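-- pv_equiv track=rewrite | github.com/Shivamsingh1710/bajaj_test | app.py | alternating_caps_reverse
-- ===== SOURCE A (Python) =====
-- def alternating_caps_reverse(s: str) -> str:
--     s = s[::-1]  # reverse string
--     result = ""
--     upper = True
--     for ch in s:
--         if ch.isalpha():
--             result += ch.upper() if upper else ch.lower()
--             upper = not upper
--     return result
-- ===== SOURCE B (Python) =====
-- def alternating_caps_reverse(s: str) -> str:
--     # Scan the ORIGINAL string left-to-right (no reversal of the input):
--     # a letter seen with `remaining` letters still ahead (inclusive) lands at
--     # output index remaining-1, so its case comes from that countdown parity.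
--     remaining = sum(ch.isalpha() for ch in s)
--     out = []
--     for ch in s:
--         if ch.isalpha():
--             remaining -= 1
--             out.append(ch.upper() if remaining % 2 == 0 else ch.lower())
--     return ''.join(reversed(out))
-- ===== Notes on version B (the rewrite author's own statement) =====
-- stated objective: alternative
-- what changed: B never reverses the input and carries no case toggle: it precomputes the letter count, scans the original string forward deciding each letter's case from a countdown of remaining letters (its final output position's parity), and reverses the built list once at the end.
import Mathlib
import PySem

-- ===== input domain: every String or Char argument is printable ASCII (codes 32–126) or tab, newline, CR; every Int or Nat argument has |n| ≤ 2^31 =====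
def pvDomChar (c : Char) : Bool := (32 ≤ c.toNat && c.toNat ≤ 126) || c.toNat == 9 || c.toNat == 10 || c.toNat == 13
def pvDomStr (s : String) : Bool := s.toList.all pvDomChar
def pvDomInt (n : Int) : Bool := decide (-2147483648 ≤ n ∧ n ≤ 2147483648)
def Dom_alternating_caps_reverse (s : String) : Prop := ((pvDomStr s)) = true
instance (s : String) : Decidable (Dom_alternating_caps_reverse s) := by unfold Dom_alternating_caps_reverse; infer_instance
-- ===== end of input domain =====

-- B scans the ORIGINAL string forward (no input reversal, no toggle flag): it precomputes the
-- letter count, cases each letter by the parity of the countdown of remaining letters, and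
-- reverses the built list once at the end; return values proved equal on all inputs.

-- ===== PORT A =====
-- A: reverse the string, then one loop carrying (result, upper-flag), appending a cased letter
-- and toggling the flag on each alphabetic character.
def alternating_caps_reverse (s : String) : String :=
  let rev := s.toList.reverse         -- s = s[::-1]
  let fin := rev.foldl (fun (st : List Char × Bool) ch =>
      if PySem.Chars.isalpha ch then
        (st.1 ++ [if st.2 then PySem.Chars.upperChar ch else PySem.Chars.lowerChar ch], !st.2)
      else st) ([], true)
  String.ofList fin.1

-- ===== PORT B =====
-- B: remaining = sum(ch.isalpha() for ch in s); forward loop appending cased letters by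
-- countdown parity; ''.join(reversed(out)).
def alternating_caps_reverse_alt (s : String) : String :=
  let remaining := s.toList.foldl
      (fun (n : Int) ch => if PySem.Chars.isalpha ch then n + 1 else n) 0
  let fin := s.toList.foldl (fun (st : Int × List Char) ch =>
      if PySem.Chars.isalpha ch then
        (st.1 - 1, st.2 ++ [if (st.1 - 1) % 2 == 0
                            then PySem.Chars.upperChar ch else PySem.Chars.lowerChar ch])
      else st) (remaining, [])
  String.ofList fin.2.reverse

-- ===== PRECONDITION & SPEC =====
def Spec_alternating_caps_reverse (s : String) (out : String) : Prop := out = alternating_caps_reverse_alt s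
instance (s : String) (out : String) : Decidable (Spec_alternating_caps_reverse s out) := by unfold Spec_alternating_caps_reverse; infer_instance

-- ===== CLAIM (what is proved, stated in full; the proofs are below) =====
def Claim_equal_alternating_caps_reverse : Prop := ∀ (s : String), Dom_alternating_caps_reverse s → Spec_alternating_caps_reverse s (alternating_caps_reverse s)

-- ===== LEMMAS AND PROOFS =====

-- alternate-case a letter list starting with flag `up` (A's loop on the filtered letters)
def pvAlt : List Char → Bool → List Char
  | [], _ => []
  | c :: cs, up =>
      (if up then PySem.Chars.upperChar c else PySem.Chars.lowerChar c) :: pvAlt cs (!up)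

-- forward countdown casing (B's loop on the filtered letters)
def pvFwd : List Char → Int → List Char
  | [], _ => []
  | c :: cs, r =>
      (if (r - 1) % 2 == 0 then PySem.Chars.upperChar c else PySem.Chars.lowerChar c)
        :: pvFwd cs (r - 1)

theorem pvFoldA (l : List Char) (acc : List Char) (up : Bool) :
    (l.foldl (fun (st : List Char × Bool) ch =>
      if PySem.Chars.isalpha ch then
        (st.1 ++ [if st.2 then PySem.Chars.upperChar ch else PySem.Chars.lowerChar ch], !st.2)
      else st) (acc, up)).1
      = acc ++ pvAlt (l.filter (fun c => PySem.Chars.isalpha c)) up := by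
  induction l generalizing acc up with
  | nil => simp [pvAlt]
  | cons c cs ih =>
      by_cases h : PySem.Chars.isalpha c = true
      · simp [h, ih, pvAlt]
      · simp [h, ih]

theorem pvCountB (l : List Char) (n : Int) :
    l.foldl (fun (n : Int) ch => if PySem.Chars.isalpha ch then n + 1 else n) n
      = n + (l.filter (fun c => PySem.Chars.isalpha c)).length := by
  induction l generalizing n with
  | nil => simp
  | cons c cs ih =>
      by_cases h : PySem.Chars.isalpha c = true
      · simp [h, ih]; omega
      · simp [h, ih]

theorem pvFoldB (l : List Char) (acc : List Char) (r : Int) :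
    (l.foldl (fun (st : Int × List Char) ch =>
      if PySem.Chars.isalpha ch then
        (st.1 - 1, st.2 ++ [if (st.1 - 1) % 2 == 0
                            then PySem.Chars.upperChar ch else PySem.Chars.lowerChar ch])
      else st) (r, acc)).2
      = acc ++ pvFwd (l.filter (fun c => PySem.Chars.isalpha c)) r := by
  induction l generalizing acc r with
  | nil => simp [pvFwd]
  | cons c cs ih =>
      simp only [List.foldl_cons, List.filter_cons]
      by_cases h : PySem.Chars.isalpha c = true
      · rw [if_pos h, if_pos h, ih, pvFwd]
        simp
      · rw [if_neg h, if_neg h, ih]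

theorem pvFwd_snoc (xs : List Char) (c : Char) (r : Int) :
    pvFwd (xs ++ [c]) r
      = pvFwd xs r ++ [if (r - xs.length - 1) % 2 == 0
                       then PySem.Chars.upperChar c else PySem.Chars.lowerChar c] := by
  induction xs generalizing r with
  | nil => simp [pvFwd]
  | cons x xs ih =>
      simp only [List.cons_append, pvFwd, ih, List.length_cons]
      have he : r - 1 - (xs.length : Int) - 1 = r - ((xs.length : Int) + 1) - 1 := by ring
      push_cast
      rw [he]

-- core bridge: reversing B's forward countdown gives A's toggled pass over the reversed letters
theorem pvBridge (m : List Char) (r : Int) :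
    pvAlt m (((r - m.length) % 2 == 0)) = (pvFwd m.reverse r).reverse := by
  induction m generalizing r with
  | nil => simp [pvAlt, pvFwd]
  | cons c ms ih =>
      simp only [pvAlt, List.reverse_cons, pvFwd_snoc, List.reverse_append, List.length_cons,
        List.length_reverse, List.reverse_nil, List.nil_append, List.singleton_append]
      have hc : r - ((ms.length + 1 : Nat) : Int) = r - (ms.length : Int) - 1 := by
        push_cast; ring
      simp only [hc]
      have hflip : (!((r - (ms.length : Int) - 1) % 2 == 0)) = ((r - (ms.length : Int)) % 2 == 0) := by
        rcases Int.emod_two_eq_zero_or_one (r - (ms.length : Int) - 1) with h | h <;>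
          · simp [h]; omega
      rw [hflip, ih]

-- ===== VERDICT (by name: the statement is the Claim_ definition above) =====
theorem alternating_caps_reverse_spec : Claim_equal_alternating_caps_reverse := by
  intro s _
  unfold Spec_alternating_caps_reverse alternating_caps_reverse alternating_caps_reverse_alt
  simp only [pvFoldA, pvFoldB, pvCountB, List.nil_append]
  rw [List.filter_reverse]
  congr 1
  have h := pvBridge ((s.toList.filter (fun c => PySem.Chars.isalpha c)).reverse)
      (0 + ((s.toList.filter (fun c => PySem.Chars.isalpha c)).length : Int))
  simp only [List.length_reverse, List.reverse_reverse] at h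
  norm_num at h ⊢
  exact h
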